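-- pv_equiv track=rewrite | github.com/abhishekmishra/liwon | src/main/python/liwon.py | get_related
-- ===== SOURCE A (Python) =====
-- def get_related(txt):
--     relatedstr = ""
--     inrel = False
--     for l in txt:
--         if inrel:
--             if l.isspace():
--                 break
--             relatedstr += l
--         if l.startswith('Related:'):
--             inrel = True
--
--     related = relatedstr.split(',')
--     related = [x.strip() for x in related]
--     return related
-- ===== SOURCE B (Python) =====
-- def get_related(txt):
--     marks = [i for i, l in enumerate(txt) if l.startswith('Related:')]
--     if not marks:
--         body = ''
--     else:
--         start = marks[0] + 1
--         ws = [j for j, l in enumerate(txt) if j >= start and l.isspace()]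
--         end = ws[0] if ws else len(txt)
--         body = ''.join(txt[start:end])
--     return [x.strip() for x in body.split(',')]
-- ===== Notes on version B (the rewrite author's own statement) =====
-- stated objective: alternative
-- what changed: Replaces A's stateful flag-driven scan by index arithmetic: compute the list of marker indices and the list of whitespace-line indices past the marker via enumerate comprehensions, then extract the region with one slice txt[start:end] and join/split it.
import Mathlib
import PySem

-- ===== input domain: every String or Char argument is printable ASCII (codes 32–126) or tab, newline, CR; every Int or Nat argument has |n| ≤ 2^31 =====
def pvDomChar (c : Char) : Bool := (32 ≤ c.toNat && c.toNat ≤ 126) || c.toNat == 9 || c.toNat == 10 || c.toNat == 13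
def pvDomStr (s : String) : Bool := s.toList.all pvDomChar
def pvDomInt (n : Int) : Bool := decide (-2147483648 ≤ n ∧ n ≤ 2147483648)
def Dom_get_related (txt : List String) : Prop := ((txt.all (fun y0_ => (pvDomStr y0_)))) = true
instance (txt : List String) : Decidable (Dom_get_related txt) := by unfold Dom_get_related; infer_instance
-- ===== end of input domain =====

-- B replaces A's stateful flag-driven scan by index arithmetic (marker index, first whitespace
-- index after it, one slice of txt, one join/split); objective: alternative decomposition.

-- ===== PORT A =====
-- A's loop: state (relatedstr, inrel); 'break' = return the accumulator.
def getRelLoopA : List String → List Char → Bool → List Char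
  | [], acc, _ => acc
  | l :: rest, acc, inrel =>
    if inrel then
      if PySem.Chars.strIsspace l.toList then acc
      else
        let acc' := acc ++ l.toList
        if PySem.Chars.startswith l.toList "Related:".toList then getRelLoopA rest acc' true
        else getRelLoopA rest acc' true
    else
      if PySem.Chars.startswith l.toList "Related:".toList then getRelLoopA rest acc true
      else getRelLoopA rest acc false

def get_related (txt : List String) : List String :=
  let relatedstr := getRelLoopA txt [] false
  let related := PySem.Chars.splitOn relatedstr [',']
  (related.map PySem.Chars.strip).map String.ofList

-- ===== PORT B =====
-- marks = [i for i, l in enumerate(txt) if l.startswith('Related:')]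
-- ws    = [j for j, l in enumerate(txt) if j >= start and l.isspace()]
-- body  = ''.join(txt[start:end])
def get_related_alt (txt : List String) : List String :=
  let marks := ((PySem.List.enumerate txt 0).filter
      (fun p => PySem.Chars.startswith p.2.toList "Related:".toList)).map (·.1)
  let body : List Char :=
    match marks with
    | [] => []
    | i :: _ =>
      let start := i + 1
      let ws := ((PySem.List.enumerate txt 0).filter
          (fun p => decide (start ≤ p.1) && PySem.Chars.strIsspace p.2.toList)).map (·.1)
      let stop : Int := match ws with | [] => (txt.length : Int) | j :: _ => j
      PySem.Chars.join [] ((PySem.List.slice txt (some start) (some stop)).map String.toList)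
  ((PySem.Chars.splitOn body [',']).map PySem.Chars.strip).map String.ofList

-- ===== PRECONDITION & SPEC =====
def Spec_get_related (txt : List String) (out : List String) : Prop := out = get_related_alt txt
instance (txt : List String) (out : List String) : Decidable (Spec_get_related txt out) := by unfold Spec_get_related; infer_instance

-- ===== CLAIM (what is proved, stated in full; the proofs are below) =====
def Claim_equal_get_related : Prop := ∀ (txt : List String), Dom_get_related txt → Spec_get_related txt (get_related txt)

-- ===== LEMMAS AND PROOFS =====

-- proof-side helpers: A's loop after/before the marker, in structural form
def skipM : List String → List String
  | [] => []
  | l :: rest =>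
    if PySem.Chars.startswith l.toList "Related:".toList then rest
    else skipM rest

def collectW : List String → List String
  | [] => []
  | l :: rest =>
    if PySem.Chars.strIsspace l.toList then []
    else l :: collectW rest

theorem join_nil_flat (ls : List (List Char)) :
    PySem.Chars.join [] ls = ls.flatten := by
  induction ls with
  | nil => simp [PySem.Chars.join, List.intercalate]
  | cons h t ih =>
    cases t with
    | nil => simp [PySem.Chars.join, List.intercalate]
    | cons h2 t2 =>
      simp only [PySem.Chars.join] at ih ⊢
      simp only [List.intercalate, List.intersperse, List.flatten] at ih ⊢
      simp [ih]

theorem loopA_true (rest : List String) (acc : List Char) :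
    getRelLoopA rest acc true = acc ++ ((collectW rest).map String.toList).flatten := by
  induction rest generalizing acc with
  | nil => simp [getRelLoopA, collectW]
  | cons l t ih =>
    rw [getRelLoopA]
    by_cases hs : PySem.Chars.strIsspace l.toList = true
    · simp [hs, collectW]
    · simp [hs, collectW, ih, ite_self]

theorem loopA_false (txt : List String) :
    getRelLoopA txt [] false = ((collectW (skipM txt)).map String.toList).flatten := by
  induction txt with
  | nil => simp [getRelLoopA, skipM, collectW]
  | cons l t ih =>
    simp only [getRelLoopA, skipM]
    by_cases hm : PySem.Chars.startswith l.toList ['R','e','l','a','t','e','d',':'] = true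
    · simp [hm, loopA_true]
    · simp [hm, ih]

-- first marker index characterises skipM
theorem skipM_eq (txt : List String) :
    skipM txt =
      match List.findIdx? (fun l => PySem.Chars.startswith l.toList "Related:".toList) txt with
      | none => []
      | some k => txt.drop (k + 1) := by
  induction txt with
  | nil => simp [skipM]
  | cons l t ih =>
    rw [skipM, List.findIdx?_cons]
    by_cases hm : PySem.Chars.startswith l.toList ['R','e','l','a','t','e','d',':'] = true
    · simp [hm]
    · rw [ih]
      cases h : List.findIdx? (fun l => PySem.Chars.startswith l.toList ['R','e','l','a','t','e','d',':']) t <;>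
        simp [hm, h]

-- first whitespace index characterises collectW
theorem collectW_eq (l : List String) :
    collectW l =
      l.take ((List.findIdx? (fun s => PySem.Chars.strIsspace s.toList) l).getD l.length) := by
  induction l with
  | nil => simp [collectW]
  | cons x t ih =>
    rw [collectW, List.findIdx?_cons]
    by_cases hs : PySem.Chars.strIsspace x.toList = true
    · simp [hs]
    · simp only [hs, Bool.false_eq_true, if_false, ih]
      cases List.findIdx? (fun s => PySem.Chars.strIsspace s.toList) t <;> simp

-- head of the filtered-enumerate index list = findIdx?
theorem marks_head (p : String → Bool) (txt : List String) (s : Nat) :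
    ((((PySem.List.enumerate txt (s : Int)).filter (fun q => p q.2)).map (·.1)).head?) =
      (List.findIdx? p txt).map (fun k => ((s + k : Nat) : Int)) := by
  induction txt generalizing s with
  | nil => simp [PySem.List.enumerate_nil]
  | cons x t ih =>
    rw [PySem.List.enumerate_cons, List.findIdx?_cons]
    by_cases hp : p x = true
    · simp [hp]
    · have : ((s : Int) + 1) = ((s + 1 : Nat) : Int) := by push_cast; ring
      simp only [List.filter_cons, hp, Bool.false_eq_true, if_false, this, ih]
      cases List.findIdx? p t <;> simp <;> push_cast <;> ring

-- head of the offset-filtered index list = findIdx? on the dropped suffix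
theorem ws_head (p : String → Bool) (txt : List String) (s n : Nat) :
    ((((PySem.List.enumerate txt (s : Int)).filter
        (fun q => decide (((s + n : Nat) : Int) ≤ q.1) && p q.2)).map (·.1)).head?) =
      (List.findIdx? p (txt.drop n)).map (fun k => ((s + n + k : Nat) : Int)) := by
  induction txt generalizing s n with
  | nil => simp [PySem.List.enumerate_nil]
  | cons x t ih =>
    rw [PySem.List.enumerate_cons]
    have hcast : ((s : Int) + 1) = ((s + 1 : Nat) : Int) := by push_cast; ring
    cases n with
    | zero =>
      by_cases hp : p x = true
      · have hx : (decide (((s + 0 : Nat) : Int) ≤ ((s : Int), x).1) && p ((s : Int), x).2) = true := by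
          simp [hp]
        rw [List.filter_cons, hx, if_pos rfl]
        simp [List.findIdx?_cons, hp]
      · have hx : (decide (((s + 0 : Nat) : Int) ≤ ((s : Int), x).1) && p ((s : Int), x).2) = false := by
          simp [hp]
        have hcong : (PySem.List.enumerate t ((s + 1 : Nat) : Int)).filter
              (fun q => decide (((s + 0 : Nat) : Int) ≤ q.1) && p q.2) =
            (PySem.List.enumerate t ((s + 1 : Nat) : Int)).filter
              (fun q => decide (((s + 1 + 0 : Nat) : Int) ≤ q.1) && p q.2) := by
          apply List.filter_congr
          intro q hq
          rcases (PySem.List.mem_enumerate_iff _ _ _).1 hq with ⟨k, hk, rfl⟩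
          have h1 : (((s + 0 : Nat) : Int) ≤ ((s + 1 : Nat) : Int) + (k : Int)) := by push_cast; omega
          have h2 : (((s + 1 + 0 : Nat) : Int) ≤ ((s + 1 : Nat) : Int) + (k : Int)) := by push_cast; omega
          rw [decide_eq_true h1, decide_eq_true h2]
        rw [List.filter_cons, hx]
        simp only [Bool.false_eq_true, if_false]
        rw [hcast, hcong, ih]
        simp only [List.drop_zero, List.findIdx?_cons, hp, Bool.false_eq_true, if_false]
        cases List.findIdx? p t <;> simp <;> push_cast <;> ring
    | succ m =>
      have hx : (decide (((s + (m + 1) : Nat) : Int) ≤ ((s : Int), x).1) && p ((s : Int), x).2) = false := by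
        have h : ¬ (((s + (m + 1) : Nat) : Int) ≤ (s : Int)) := by push_cast; omega
        simp [h]
      have hn : s + (m + 1) = s + 1 + m := by omega
      rw [List.filter_cons, hx]
      simp only [Bool.false_eq_true, if_false]
      rw [hcast, hn, ih]
      simp only [List.drop_succ_cons]

-- the two body computations agree
theorem body_eq (txt : List String) :
    getRelLoopA txt [] false =
      (match ((PySem.List.enumerate txt 0).filter
          (fun p => PySem.Chars.startswith p.2.toList "Related:".toList)).map (·.1) with
       | [] => ([] : List Char)
       | i :: _ =>
         let start := i + 1
         let ws := ((PySem.List.enumerate txt 0).filter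
             (fun p => decide (start ≤ p.1) && PySem.Chars.strIsspace p.2.toList)).map (·.1)
         let stop : Int := match ws with | [] => (txt.length : Int) | j :: _ => j
         PySem.Chars.join [] ((PySem.List.slice txt (some start) (some stop)).map String.toList)) := by
  rw [loopA_false, skipM_eq]
  have hmh := marks_head (fun l => PySem.Chars.startswith l.toList "Related:".toList) txt 0
  simp only [Nat.cast_zero, Nat.zero_add] at hmh
  cases hfm : List.findIdx? (fun l => PySem.Chars.startswith l.toList "Related:".toList) txt with
  | none =>
    rw [hfm] at hmh
    simp only [Option.map_none] at hmh
    rw [List.head?_eq_none_iff.1 hmh]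
    simp [collectW]
  | some k =>
    rw [hfm] at hmh
    simp only [Option.map_some] at hmh
    cases hml : ((PySem.List.enumerate txt 0).filter
        (fun p => PySem.Chars.startswith p.2.toList "Related:".toList)).map (·.1) with
    | nil => rw [hml] at hmh; simp at hmh
    | cons i rest =>
      rw [hml] at hmh
      simp only [List.head?_cons] at hmh
      injection hmh with hi
      subst hi
      have hc : ((k : Int) + 1) = ((k + 1 : Nat) : Int) := by push_cast; ring
      have hwh := ws_head (fun l => PySem.Chars.strIsspace l.toList) txt 0 (k + 1)
      simp only [Nat.cast_zero, Nat.zero_add] at hwh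
      cases hfw : List.findIdx? (fun l => PySem.Chars.strIsspace l.toList) (txt.drop (k + 1)) with
      | none =>
        rw [hfw] at hwh
        simp only [Option.map_none] at hwh
        simp only [hml, hc, List.head?_eq_none_iff.1 hwh, collectW_eq, hfw, Option.getD_none,
          PySem.List.slice_natCast, join_nil_flat, List.length_drop]
      | some m =>
        rw [hfw] at hwh
        simp only [Option.map_some] at hwh
        cases hwl : ((PySem.List.enumerate txt 0).filter
            (fun p => decide (((k + 1 : Nat) : Int) ≤ p.1) && PySem.Chars.strIsspace p.2.toList)).map (·.1) with
        | nil => rw [hwl] at hwh; simp at hwh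
        | cons j ws2 =>
          rw [hwl] at hwh
          simp only [List.head?_cons] at hwh
          injection hwh with hj
          subst hj
          have harith : k + 1 + m - (k + 1) = m := by omega
          simp only [hml, hc, hwl, collectW_eq, hfw, Option.getD_some,
            PySem.List.slice_natCast, join_nil_flat, harith]

-- ===== VERDICT (by name: the statement is the Claim_ definition above) =====
theorem get_related_spec : Claim_equal_get_related := by
  intro txt _
  unfold Spec_get_related
  simp only [get_related, get_related_alt]
  rw [body_eq]
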